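-- pv_equiv track=rewrite | github.com/h3nrry/finlab | strlib.py | strhex2strbin
-- ===== SOURCE A (Python) =====
-- def strhex2strbin(s):
--     hex2bin_lut = ['0000','0001','0010','0011',
--                    '0100','0101','0110','0111',
--                    '1000','1001','1010','1011',
--                    '1100','1101','1110','1111']
--     sbin=''
--     for i in range(len(s)):
--         sbin += hex2bin_lut[int(s[i],base=16)]
--     return sbin
-- ===== SOURCE B (Python) =====
-- def strhex2strbin(s):
--     # Build the bit string back-to-front: walk the hex string right-to-left,
--     # extract each nibble's 4 bits arithmetically (LSB first), then reverse once.
--     out = []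
--     for ch in reversed(s):
--         v = int(ch, base=16)
--         for _ in range(4):
--             out.append('01'[v & 1])
--             v >>= 1
--     out.reverse()
--     return ''.join(out)
-- ===== Notes on version B (the rewrite author's own statement) =====
-- stated objective: alternative
-- what changed: Replaced the 16-entry LUT with arithmetic bit extraction: B walks the string right-to-left, emits each nibble's bits LSB-first into a list, and reverses once at the end, instead of A's forward loop concatenating LUT entries.
import Mathlib
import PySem

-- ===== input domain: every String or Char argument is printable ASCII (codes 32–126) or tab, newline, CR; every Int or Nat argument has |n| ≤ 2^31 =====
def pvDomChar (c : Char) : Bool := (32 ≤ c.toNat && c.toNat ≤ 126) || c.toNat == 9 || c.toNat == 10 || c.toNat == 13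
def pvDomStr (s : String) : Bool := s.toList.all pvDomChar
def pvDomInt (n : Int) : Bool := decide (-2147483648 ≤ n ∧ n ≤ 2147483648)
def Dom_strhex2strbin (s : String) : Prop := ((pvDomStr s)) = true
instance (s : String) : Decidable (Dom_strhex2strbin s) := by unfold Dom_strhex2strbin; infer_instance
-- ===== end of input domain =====

-- B replaces A's 16-entry lookup table and forward string concatenation by a right-to-left
-- walk that emits each nibble's bits LSB-first and reverses once (alternative decomposition, same O(n) cost).


-- ===== PORT A =====
-- the LUT literal from A
def hex2binLut : List (List Char) :=
  [['0','0','0','0'],['0','0','0','1'],['0','0','1','0'],['0','0','1','1'],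
   ['0','1','0','0'],['0','1','0','1'],['0','1','1','0'],['0','1','1','1'],
   ['1','0','0','0'],['1','0','0','1'],['1','0','1','0'],['1','0','1','1'],
   ['1','1','0','0'],['1','1','0','1'],['1','1','1','0'],['1','1','1','1']]

-- for i in range(len(s)): sbin += lut[int(s[i],16)]; total forms (getD) are used
-- exactly where Pre_ guarantees Python does not raise (index in range, valid hex digit)
def strhex2strbin (s : String) : String :=
  String.mk ((PySem.List.pyRange 0 (PySem.Str.len s) 1).foldl
    (fun sbin i =>
      sbin ++ PySem.List.pyGetD hex2binLut
        ((PySem.Int.ofCharsBase? [PySem.List.pyGetD s.toList i ' '] 16).getD 0) [])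
    [])

-- ===== PORT B =====
def strhex2strbin_alt (s : String) : String :=
  String.mk
    ((s.toList.reverse.foldl
      (fun out ch =>
        ((List.range 4).foldl
          (fun (p : List Char × Int) _ =>
            (p.1 ++ [PySem.List.pyGetD ['0','1'] (PySem.Int.band p.2 1) '0'], p.2 >>> (1:Nat)))
          (out, (PySem.Int.ofCharsBase? [ch] 16).getD 0)).1)
      []).reverse)

-- ===== PRECONDITION & SPEC =====
-- the single characters accepted by Python's int(c, base=16)
def hexDigitChars : List Char :=
  ['0','1','2','3','4','5','6','7','8','9',
   'a','b','c','d','e','f','A','B','C','D','E','F']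

-- exactly the inputs where A returns: every character is a hex digit (else int(s[i],16) raises ValueError)
def Pre_strhex2strbin (s : String) : Prop := s.toList.all (fun c => hexDigitChars.contains c) = true
instance (s : String) : Decidable (Pre_strhex2strbin s) := by unfold Pre_strhex2strbin; infer_instance

def pvWitness_strhex2strbin : String := "1aF0"

def Spec_strhex2strbin (s : String) (out : String) : Prop := out = strhex2strbin_alt s
instance (s : String) (out : String) : Decidable (Spec_strhex2strbin s out) := by unfold Spec_strhex2strbin; infer_instance

-- ===== CLAIM (what is proved, stated in full; the proofs are below) =====
def Claim_equal_strhex2strbin : Prop := ∀ (s : String), Dom_strhex2strbin s → Pre_strhex2strbin s → Spec_strhex2strbin s (strhex2strbin s)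

-- ===== LEMMAS AND PROOFS =====

-- the per-character nibble both programs produce
def nib (c : Char) : List Char :=
  PySem.List.pyGetD hex2binLut ((PySem.Int.ofCharsBase? [c] 16).getD 0) []

lemma map_getD_range (xs : List Char) (d : Char) :
    (List.range xs.length).map (fun k => xs.getD k d) = xs := by
  apply List.ext_getElem
  · simp
  · intro i h1 h2
    simp [List.getElem?_eq_getElem h2]

-- A computes the concatenation of the nibbles, left to right
lemma A_eq (s : String) :
    strhex2strbin s = String.mk (s.toList.flatMap nib) := by
  unfold strhex2strbin
  rw [PySem.Str.len_eq, PySem.List.pyRange_zero_natCast, List.foldl_map]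
  have h1 : ∀ (acc : List Char),
      (List.range s.toList.length).foldl
        (fun sbin (k : Nat) =>
          sbin ++ PySem.List.pyGetD hex2binLut
            ((PySem.Int.ofCharsBase? [PySem.List.pyGetD s.toList (k : Int) ' '] 16).getD 0) []) acc
      = acc ++ (List.range s.toList.length).flatMap
          (fun k => nib (s.toList.getD k ' ')) := by
    intro acc
    have := PySem.List.foldl_append_eq_flatMap
      (fun k => nib (s.toList.getD k ' ')) (List.range s.toList.length) acc
    rw [← this]
    apply PySem.List.foldl_congr_mem
    intro a k _
    simp [nib, PySem.List.pyGetD_natCast]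
  rw [h1]
  have h2 : (List.range s.toList.length).flatMap (fun k => nib (s.toList.getD k ' '))
      = s.toList.flatMap nib := by
    have := List.flatMap_map (fun k => s.toList.getD k ' ') nib (List.range s.toList.length)
    rw [← this, map_getD_range]
  rw [h2]; rfl

-- B's inner 4-step loop appends the four bits of v, LSB first
def revbits (v : Int) : List Char :=
  [PySem.List.pyGetD ['0','1'] (PySem.Int.band v 1) '0',
   PySem.List.pyGetD ['0','1'] (PySem.Int.band (v >>> (1:Nat)) 1) '0',
   PySem.List.pyGetD ['0','1'] (PySem.Int.band ((v >>> (1:Nat)) >>> (1:Nat)) 1) '0',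
   PySem.List.pyGetD ['0','1'] (PySem.Int.band (((v >>> (1:Nat)) >>> (1:Nat)) >>> (1:Nat)) 1) '0']

lemma inner_loop (out : List Char) (v : Int) :
    ((List.range 4).foldl
      (fun (p : List Char × Int) _ =>
        (p.1 ++ [PySem.List.pyGetD ['0','1'] (PySem.Int.band p.2 1) '0'], p.2 >>> (1:Nat)))
      (out, v)).1 = out ++ revbits v := by
  simp [List.range_succ, revbits]

lemma B_eq (s : String) :
    strhex2strbin_alt s
      = String.mk (s.toList.flatMap
          (fun ch => (revbits ((PySem.Int.ofCharsBase? [ch] 16).getD 0)).reverse)) := by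
  unfold strhex2strbin_alt
  have h1 : s.toList.reverse.foldl
      (fun out ch =>
        ((List.range 4).foldl
          (fun (p : List Char × Int) _ =>
            (p.1 ++ [PySem.List.pyGetD ['0','1'] (PySem.Int.band p.2 1) '0'], p.2 >>> (1:Nat)))
          (out, (PySem.Int.ofCharsBase? [ch] 16).getD 0)).1)
      []
      = s.toList.reverse.foldl
          (fun out ch => out ++ revbits ((PySem.Int.ofCharsBase? [ch] 16).getD 0)) [] := by
    apply PySem.List.foldl_congr_mem
    intro acc ch _
    exact inner_loop acc _
  rw [h1, PySem.List.foldl_append_eq_flatMap]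
  have h2 := List.reverse_flatMap
    (l := s.toList.reverse) (f := fun ch => revbits ((PySem.Int.ofCharsBase? [ch] 16).getD 0))
  simp only [List.nil_append]
  rw [h2, List.reverse_reverse]
  rfl

-- on a hex digit the reversed bit list is exactly the LUT nibble
lemma revbits_eq_nib (c : Char) (h : c ∈ hexDigitChars) :
    (revbits ((PySem.Int.ofCharsBase? [c] 16).getD 0)).reverse = nib c := by
  fin_cases h <;> decide

-- ===== VERDICT (by name: the statement is the Claim_ definition above) =====
theorem strhex2strbin_spec : Claim_equal_strhex2strbin := by
  intro s _ hpre
  have hpre' : ∀ c ∈ s.toList, c ∈ hexDigitChars := by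
    simpa [Pre_strhex2strbin, List.all_eq_true] using hpre
  unfold Spec_strhex2strbin
  rw [A_eq, B_eq]
  congr 1
  exact (List.flatMap_congr (fun c hc => revbits_eq_nib c (hpre' c hc))).symm
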